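-- pv_equiv track=rewrite | github.com/Afridee/Karo | backend/helpers.py | _path_tokens
-- ===== SOURCE A (Python) =====
-- from typing import Any, Dict, List
--
-- def _path_tokens(path: str) -> List[str]:
--     tokens: List[str] = []
--     current = []
--     for ch in path:
--         if ch in ".[]":
--             if current:
--                 tokens.append("".join(current))
--                 current = []
--             continue
--         current.append(ch)
--     if current:
--         tokens.append("".join(current))
--     return tokens
-- ===== SOURCE B (Python) =====
-- from typing import List
--
-- def _path_tokens(path: str) -> List[str]:
--     return [t for t in path.replace("[", ".").replace("]", ".").split(".") if t]
-- ===== Notes on version B (the rewrite author's own statement) =====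
-- stated objective: faster
-- what changed: Replaced the per-character scanner with an explicit buffer by normalising both bracket delimiters to the dot delimiter via str.replace, splitting the whole string once, and filtering out empty tokens.
import Mathlib
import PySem

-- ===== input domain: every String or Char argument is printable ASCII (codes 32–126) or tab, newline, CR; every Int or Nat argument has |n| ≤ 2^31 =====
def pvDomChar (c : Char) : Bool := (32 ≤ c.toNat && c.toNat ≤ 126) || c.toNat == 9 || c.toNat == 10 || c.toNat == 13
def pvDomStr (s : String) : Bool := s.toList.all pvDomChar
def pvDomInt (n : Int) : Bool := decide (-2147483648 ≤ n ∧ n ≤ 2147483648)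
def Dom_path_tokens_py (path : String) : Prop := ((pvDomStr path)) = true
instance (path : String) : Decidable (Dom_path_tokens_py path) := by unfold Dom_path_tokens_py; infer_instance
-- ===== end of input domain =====

-- B replaces A's per-character scanner (explicit token buffer) with a normalise / split / filter pipeline (measured faster in Python: the work moves into built-in replace/split).

-- ===== PORT A =====
def path_tokens_py (path : String) : List String :=
  let r := path.toList.foldl
    (fun (st : List String × List Char) ch =>
      if ch ∈ ".[]".toList then
        if st.2 ≠ [] then (st.1 ++ [String.ofList st.2], []) else st
      else (st.1, st.2 ++ [ch]))
    ([], [])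
  if r.2 ≠ [] then r.1 ++ [String.ofList r.2] else r.1

-- ===== PORT B =====
def path_tokens_py_alt (path : String) : List String :=
  let s := PySem.Str.replace (PySem.Str.replace path "[" ".") "]" "."
  let toks := (PySem.Chars.splitOn s.toList ['.']).map String.ofList
  toks.filter (fun t => t ≠ "")

-- ===== PRECONDITION & SPEC =====
def Spec_path_tokens_py (path : String) (out : List String) : Prop := out = path_tokens_py_alt path
instance (path : String) (out : List String) : Decidable (Spec_path_tokens_py path out) := by unfold Spec_path_tokens_py; infer_instance

-- ===== CLAIM (what is proved, stated in full; the proofs are below) =====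
def Claim_equal_path_tokens_py : Prop := ∀ (path : String), Dom_path_tokens_py path → Spec_path_tokens_py path (path_tokens_py path)

-- ===== LEMMAS AND PROOFS =====

theorem pv_replace_go_single (a b : Char) :
    ∀ (fuel : Nat) (l acc : List Char), l.length ≤ fuel →
      PySem.Chars.replace.go [a] [b] fuel l acc
        = acc.reverse ++ l.map (fun c => if c = a then b else c) := by
  intro fuel
  induction fuel with
  | zero =>
    intro l acc h
    have : l = [] := by cases l <;> simp_all
    subst this; simp [PySem.Chars.replace.go]
  | succ n ih =>
    intro l acc h
    cases l with
    | nil => simp [PySem.Chars.replace.go]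
    | cons c t =>
      rw [PySem.Chars.replace.go]
      by_cases hc : c = a
      · subst hc
        simp only [List.isPrefixOf, BEq.rfl, Bool.and_self, if_pos, List.length_cons,
          List.length_nil, List.drop_succ_cons, List.drop_zero]
        rw [ih t _ (by simpa using h)]
        simp
      · have hpre : List.isPrefixOf [a] (c :: t) = false := by
          simp [List.isPrefixOf]; intro hh; exact absurd hh.symm hc
        rw [hpre]
        simp only [Bool.false_eq_true, if_false]
        rw [ih t _ (by simpa using h)]
        simp [hc]

theorem pv_replace_single (l : List Char) (a b : Char) :
    PySem.Chars.replace l [a] [b] = l.map (fun c => if c = a then b else c) := by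
  have := pv_replace_go_single a b l.length l [] le_rfl
  simpa [PySem.Chars.replace] using this

theorem pv_splitOn_go_single (c : Char) :
    ∀ (fuel : Nat) (l cur : List Char) (acc : List (List Char)), l.length < fuel →
      PySem.Chars.splitOn.go [c] fuel l cur acc
        = acc.reverse ++ (List.splitOnP (· == c) l).modifyHead (cur.reverse ++ ·) := by
  intro fuel
  induction fuel with
  | zero => intro l cur acc h; omega
  | succ n ih =>
    intro l cur acc h
    cases l with
    | nil => simp [PySem.Chars.splitOn.go, List.splitOnP_nil]
    | cons x t =>
      rw [PySem.Chars.splitOn.go]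
      by_cases hx : x = c
      · subst hx
        simp only [List.isPrefixOf, BEq.rfl, Bool.and_self, if_pos, List.length_cons,
          List.length_nil, List.drop_succ_cons, List.drop_zero]
        rw [ih t [] _ (by simpa using h)]
        rcases hne : List.splitOnP (· == x) t with _ | ⟨p, ps⟩
        · exact absurd hne (List.splitOnP_ne_nil _ _)
        · simp [List.splitOnP_cons, hne]
      · have hpre : List.isPrefixOf [c] (x :: t) = false := by
          simp [List.isPrefixOf]; intro hh; exact absurd hh.symm hx
        rw [hpre]
        simp only [Bool.false_eq_true, if_false]
        rw [ih t (x :: cur) acc (by simpa using h)]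
        rcases hne : List.splitOnP (· == c) t with _ | ⟨p, ps⟩
        · exact absurd hne (List.splitOnP_ne_nil _ _)
        · simp [List.splitOnP_cons, hne, hx]

theorem pv_splitOn_single (l : List Char) (c : Char) :
    PySem.Chars.splitOn l [c] = List.splitOnP (· == c) l := by
  have := pv_splitOn_go_single c (l.length + 1) l [] [] (by omega)
  rcases hne : List.splitOnP (· == c) l with _ | ⟨p, ps⟩
  · exact absurd hne (List.splitOnP_ne_nil _ _)
  · simpa [PySem.Chars.splitOn, hne] using this

def pvIsDelim (c : Char) : Bool := c == '.' || c == '[' || c == ']'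

theorem pv_splitOnP_map (l : List Char) :
    List.splitOnP (· == '.')
        (l.map (fun c => if c = ']' then '.' else if c = '[' then '.' else c))
      = List.splitOnP pvIsDelim l := by
  induction l with
  | nil => simp
  | cons c t ih =>
    simp only [List.map_cons, List.splitOnP_cons, ih]
    by_cases h1 : c = '.' <;> by_cases h2 : c = '[' <;> by_cases h3 : c = ']' <;>
      simp_all [pvIsDelim]

def pvTok (cur : List Char) : List Char → List (List Char)
  | [] => if cur = [] then [] else [cur]
  | c :: cs =>
    if pvIsDelim c then (if cur = [] then pvTok [] cs else cur :: pvTok [] cs)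
    else pvTok (cur ++ [c]) cs

theorem pv_tok_eq (cs : List Char) : ∀ (cur : List Char),
    pvTok cur cs = ((List.splitOnP pvIsDelim cs).modifyHead (cur ++ ·)).filter (· ≠ []) := by
  induction cs with
  | nil => intro cur; by_cases h : cur = [] <;> simp [pvTok, h]
  | cons c t ih =>
    intro cur
    rcases hne : List.splitOnP pvIsDelim t with _ | ⟨p, ps⟩
    · exact absurd hne (List.splitOnP_ne_nil _ _)
    by_cases hd : pvIsDelim c
    · by_cases h : cur = []
      · simp [pvTok, hd, h, ih, List.splitOnP_cons, hne]
      · simp [pvTok, hd, h, ih, List.splitOnP_cons, hne]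
    · simp [pvTok, hd, ih, List.splitOnP_cons, hne]

theorem pv_loop (cs : List Char) : ∀ (tokens : List String) (cur : List Char),
    (let r := cs.foldl
        (fun (st : List String × List Char) ch =>
          if ch ∈ ".[]".toList then
            if st.2 ≠ [] then (st.1 ++ [String.ofList st.2], []) else st
          else (st.1, st.2 ++ [ch]))
        (tokens, cur)
     if r.2 ≠ [] then r.1 ++ [String.ofList r.2] else r.1)
      = tokens ++ (pvTok cur cs).map String.ofList := by
  induction cs with
  | nil =>
    intro tokens cur
    by_cases h : cur = [] <;> simp [pvTok, h]
  | cons c t ih =>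
    intro tokens cur
    have hmem : (c ∈ ".[]".toList) ↔ pvIsDelim c = true := by
      have : ".[]".toList = ['.', '[', ']'] := rfl
      simp only [this, List.mem_cons, List.not_mem_nil, or_false, pvIsDelim,
        Bool.or_eq_true, beq_iff_eq]; tauto
    by_cases hd : pvIsDelim c
    · by_cases h : cur = []
      · simp only [List.foldl_cons, if_pos (hmem.mpr hd), h]
        simpa [pvTok, hd, h] using ih tokens []
      · simp only [List.foldl_cons, if_pos (hmem.mpr hd), if_pos h]
        have := ih (tokens ++ [String.ofList cur]) []
        simp only [pvTok, hd, if_neg h] at this ⊢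
        simpa using this
    · have hm : ¬ (c ∈ ".[]".toList) := fun hh => hd (hmem.mp hh)
      have hd' : pvIsDelim c = false := by simpa using hd
      simp only [List.foldl_cons, if_neg hm]
      have := ih tokens (cur ++ [c])
      simp only [pvTok, hd', Bool.false_eq_true, if_false] at this ⊢
      exact this

theorem pv_main (path : String) : path_tokens_py path = path_tokens_py_alt path := by
  have lhs : path_tokens_py path
      = ((List.splitOnP pvIsDelim path.toList).filter (· ≠ [])).map String.ofList := by
    have h1 := pv_loop path.toList [] []
    have h2 := pv_tok_eq path.toList []
    rcases hne : List.splitOnP pvIsDelim path.toList with _ | ⟨p, ps⟩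
    · exact absurd hne (List.splitOnP_ne_nil _ _)
    · simp only [hne, List.modifyHead_cons, List.nil_append] at h2
      rw [path_tokens_py]; rw [h1, h2]; simp
  have rhs : path_tokens_py_alt path
      = ((List.splitOnP pvIsDelim path.toList).filter (· ≠ [])).map String.ofList := by
    rw [path_tokens_py_alt]
    simp only [PySem.Str.toList_replace]
    have e1 : "[".toList = ['['] := rfl
    have e2 : "]".toList = [']'] := rfl
    have e3 : ".".toList = ['.'] := rfl
    rw [e1, e2, e3, pv_replace_single, pv_replace_single, List.map_map]
    have ecomp : ((fun c => if c = ']' then '.' else c) ∘ fun c => if c = '[' then '.' else c)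
        = fun c => if c = ']' then '.' else if c = '[' then '.' else c := by
      funext c
      by_cases h1 : c = '[' <;> by_cases h2 : c = ']' <;> simp_all
    rw [ecomp, pv_splitOn_single, pv_splitOnP_map, List.filter_map]
    congr 1
    apply List.filter_congr
    intro x _
    have hx : (String.ofList x = "") ↔ x = [] := by
      constructor
      · intro h; have := congrArg String.toList h; simpa using this
      · rintro rfl; rfl
    simp [hx]
  rw [lhs, rhs]

-- ===== VERDICT (by name: the statement is the Claim_ definition above) =====
theorem path_tokens_py_spec : Claim_equal_path_tokens_py := by
  intro path _
  unfold Spec_path_tokens_py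
  exact pv_main path
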